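-- pv_equiv track=rewrite | github.com/AleksandrBelous/Noise-Resistant-Coding | python/block_parity.py | block_encode
-- ===== SOURCE A (Python) =====
-- def block_encode(message):
--     """Кодирование сообщения блочным кодом с проверкой на четность"""
--     # Разбиваем сообщение на блоки по 8 бит
--     blocks = [message[i:i + 8] for i in range(0, len(message), 8)]
--
--     encoded_blocks = []
--     for block in blocks:
--         # Вычисляем бит четности
--         parity_bit = str(block.count('1') % 2)
--         # Добавляем бит четности в начало блока
--         encoded_block = parity_bit + block
--         encoded_blocks.append(encoded_block)
--
--     # Объединяем закодированные блоки в одну строку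
--     encoded_message = ''.join(encoded_blocks)
--     return encoded_message
-- ===== SOURCE B (Python) =====
-- def block_encode(message):
--     """Single left-to-right pass: keep a running XOR parity and the current
--     block buffer; flush '<parity><block>' every 8 chars and at the end."""
--     encoded = ''
--     block = ''
--     parity = 0
--     for ch in message:
--         block += ch
--         if ch == '1':
--             parity ^= 1
--         if len(block) == 8:
--             encoded += str(parity) + block
--             block = ''
--             parity = 0
--     if block:
--         encoded += str(parity) + block
--     return encoded
-- ===== Notes on version B (the rewrite author's own statement) =====
-- stated objective: alternative
-- what changed: Replaced the slice-into-blocks-then-count pass (range/slicing plus block.count per block) by a single left-to-right character pass that maintains a running XOR parity and the current block buffer, flushing every 8 characters and once at the end.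
import Mathlib
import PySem

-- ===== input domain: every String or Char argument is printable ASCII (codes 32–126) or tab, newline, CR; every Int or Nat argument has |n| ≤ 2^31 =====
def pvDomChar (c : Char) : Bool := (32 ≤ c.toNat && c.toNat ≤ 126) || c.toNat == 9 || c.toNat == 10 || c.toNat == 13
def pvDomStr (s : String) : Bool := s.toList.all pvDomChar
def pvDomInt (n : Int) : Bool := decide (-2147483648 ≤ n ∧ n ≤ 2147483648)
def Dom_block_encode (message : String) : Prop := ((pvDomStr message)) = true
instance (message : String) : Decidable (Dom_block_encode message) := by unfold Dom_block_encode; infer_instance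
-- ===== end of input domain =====

-- B replaces A's slice-into-8-blocks-then-count decomposition by a single pass with a
-- running XOR parity and a block buffer (alternative decomposition, same return value).

-- ===== PORT A =====
-- A over the character list: blocks = [message[i:i+8] for i in range(0, len(message), 8)],
-- each block prefixed with str(block.count('1') % 2), all joined with ''.
def blockEncodeCoreA (cs : List Char) : List Char :=
  let blocks := (PySem.List.pyRange 0 (PySem.List.len cs) 8).map
      (fun i => PySem.List.slice cs (some i) (some (i + 8)))
  let encoded_blocks := blocks.foldl (fun acc block =>
      let parity_bit := PySem.Int.toChars
        (PySem.Int.mod ((PySem.List.count block '1' : Nat) : Int) 2)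
      acc ++ [parity_bit ++ block]) ([] : List (List Char))
  PySem.Chars.join [] encoded_blocks

def block_encode (message : String) : String :=
  String.ofList (blockEncodeCoreA message.toList)

-- ===== PORT B =====
-- B over the character list: one pass with state (encoded, block, parity); '1' flips the
-- parity, a full 8-char block is flushed as str(parity) + block, the tail flushed at the end.
def blockEncodeStepB (st : List Char × List Char × Int) (ch : Char) : List Char × List Char × Int :=
  let block := st.2.1 ++ [ch]
  let parity := if ch = '1' then PySem.Int.bxor st.2.2 1 else st.2.2
  if block.length = 8 then (st.1 ++ PySem.Int.toChars parity ++ block, [], 0)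
  else (st.1, block, parity)

def blockEncodeCoreB (cs : List Char) : List Char :=
  let fin := cs.foldl blockEncodeStepB ([], [], 0)
  if fin.2.1 = [] then fin.1 else fin.1 ++ PySem.Int.toChars fin.2.2 ++ fin.2.1

def block_encode_alt (message : String) : String :=
  String.ofList (blockEncodeCoreB message.toList)

-- ===== PRECONDITION & SPEC =====
def Spec_block_encode (message : String) (out : String) : Prop := out = block_encode_alt message
instance (message : String) (out : String) : Decidable (Spec_block_encode message out) := by unfold Spec_block_encode; infer_instance

-- ===== CLAIM (what is proved, stated in full; the proofs are below) =====
def Claim_equal_block_encode : Prop := ∀ (message : String), Dom_block_encode message → Spec_block_encode message (block_encode message)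

-- ===== LEMMAS AND PROOFS =====

-- reference form both ports are reduced to: encode 8-char chunks front to back
def chunkEnc (b : List Char) : List Char :=
  PySem.Int.toChars ((b.count '1' % 2 : Nat) : Int) ++ b

def specEnc (cs : List Char) : List Char :=
  if h : cs = [] then [] else chunkEnc (cs.take 8) ++ specEnc (cs.drop 8)
termination_by cs.length
decreasing_by
  simp only [List.length_drop]
  have : cs.length ≠ 0 := fun h0 => h (List.length_eq_zero_iff.mp h0)
  omega

theorem joinNilFlatten (l : List (List Char)) : PySem.Chars.join [] l = l.flatten := by
  induction l with
  | nil => exact PySem.Chars.join_nil []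
  | cons a t ih =>
    cases t with
    | nil => simp [PySem.Chars.join, List.intercalate]
    | cons b t2 =>
      simp only [PySem.Chars.join, List.intercalate, List.intersperse] at *
      simp_all

theorem chunkEnc_eq (b : List Char) :
    PySem.Int.toChars (PySem.Int.mod ((PySem.List.count b '1' : Nat) : Int) 2) ++ b = chunkEnc b := by
  rw [chunkEnc, PySem.List.count_eq, PySem.Int.mod_eq_emod_of_pos (by norm_num)]
  norm_cast

theorem pyRange8_cons (n : Nat) (h : 0 < n) :
    PySem.List.pyRange 0 (n : Int) 8
      = 0 :: (PySem.List.pyRange 0 ((n - 8 : Nat) : Int) 8).map (· + 8) := by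
  rw [PySem.List.pyRange_of_pos _ _ (by norm_num),
      PySem.List.pyRange_of_pos _ _ (by norm_num)]
  have hC : (if (0:Int) < (n:Int) then (((n:Int) - 0 + 8 - 1) / 8).toNat else 0)
      = (if (0:Int) < ((n-8:Nat):Int) then ((((n-8:Nat):Int) - 0 + 8 - 1) / 8).toNat else 0) + 1 := by
    split_ifs with h1 h2 <;> omega
  rw [hC, List.range_succ_eq_map, List.map_cons, List.map_map, List.map_map]
  congr 1

theorem coreA_flat (cs : List Char) : blockEncodeCoreA cs
    = (((PySem.List.pyRange 0 (cs.length : Int) 8).map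
        (fun i => PySem.List.slice cs (some i) (some (i + 8)))).map chunkEnc).flatten := by
  unfold blockEncodeCoreA
  simp only [PySem.List.len_eq]
  rw [show (fun (acc : List (List Char)) (block : List Char) =>
        let parity_bit := PySem.Int.toChars
          (PySem.Int.mod ((PySem.List.count block '1' : Nat) : Int) 2)
        acc ++ [parity_bit ++ block])
      = fun acc block => acc ++ [chunkEnc block] from funext fun acc => funext fun block => by
        simp only []; rw [chunkEnc_eq]]
  rw [PySem.List.foldl_append_singleton_eq_map, List.nil_append, joinNilFlatten]

theorem slice_shift (cs : List Char) (i : Int) (hi : 0 ≤ i) :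
    PySem.List.slice cs (some (i + 8)) (some (i + 8 + 8))
      = PySem.List.slice (cs.drop 8) (some i) (some (i + 8)) := by
  rw [PySem.List.slice_toNat _ (by omega) (by omega), PySem.List.slice_toNat _ hi (by omega),
      List.drop_drop]
  have h1 : (i + 8 + 8).toNat - (i + 8).toNat = 8 := by omega
  have h2 : (i + 8).toNat - i.toNat = 8 := by omega
  have h3 : (i + 8).toNat = 8 + i.toNat := by omega
  rw [h1, h2, h3]

theorem A_eq_spec (cs : List Char) : blockEncodeCoreA cs = specEnc cs := by
  rw [coreA_flat, specEnc]
  by_cases h : cs = []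
  · subst h; simp [PySem.List.pyRange]
  · have hn : 0 < cs.length := List.length_pos_iff.mpr h
    have ih := A_eq_spec (cs.drop 8)
    rw [dif_neg h, pyRange8_cons cs.length hn, List.map_cons, List.map_cons, List.flatten_cons]
    congr 1
    · rw [PySem.List.slice_zero_start, show ((0:Int) + 8) = ((8:Nat):Int) by norm_num,
          PySem.List.slice_to_natCast]
    · rw [← ih, coreA_flat, List.length_drop]
      simp only [List.map_map]
      congr 1
      apply List.map_congr_left
      intro i hi
      have h0i : 0 ≤ i := ((PySem.List.mem_pyRange_iff_of_pos (by norm_num) i).mp hi).1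
      simp only [Function.comp_apply]
      rw [show i + 8 + 8 = (i + 8) + 8 from rfl]
      exact (slice_shift cs i h0i).symm ▸ rfl
termination_by cs.length
decreasing_by
  simp only [List.length_drop]; omega

theorem bxor_flip (m : Nat) :
    PySem.Int.bxor ((m % 2 : Nat) : Int) 1 = (((m + 1) % 2 : Nat) : Int) := by
  rcases Nat.mod_two_eq_zero_or_one m with h | h <;> rw [h]
  · rw [show (m + 1) % 2 = 1 by omega]; decide
  · rw [show (m + 1) % 2 = 0 by omega]; decide

theorem specEnc_block (b rest : List Char) (hb : b.length = 8) :
    specEnc (b ++ rest) = chunkEnc b ++ specEnc rest := by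
  rw [specEnc, dif_neg (by intro h0; apply_fun List.length at h0; simp [hb] at h0)]
  rw [List.take_append_of_le_length (by omega), List.drop_append_of_le_length (by omega)]
  rw [show List.take 8 b = b from by rw [← hb]; exact List.take_length ▸ rfl,
      show List.drop 8 b = [] from by rw [← hb]; simp]
  simp

theorem B_inv (cs : List Char) : ∀ (out buf : List Char), buf.length < 8 →
    (let fin := cs.foldl blockEncodeStepB (out, buf, ((buf.count '1' % 2 : Nat) : Int))
     if fin.2.1 = [] then fin.1 else fin.1 ++ PySem.Int.toChars fin.2.2 ++ fin.2.1)
      = out ++ specEnc (buf ++ cs) := by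
  induction cs with
  | nil =>
    intro out buf hlt
    simp only [List.foldl_nil, List.append_nil]
    by_cases hb : buf = []
    · subst hb; simp [specEnc]
    · rw [if_neg hb, specEnc, dif_neg hb,
          List.take_of_length_le (by omega), List.drop_eq_nil_of_le (by omega),
          specEnc, dif_pos rfl, List.append_nil, chunkEnc, List.append_assoc]
  | cons c cs ih =>
    intro out buf hlt
    simp only [List.foldl_cons]
    have hpar : (if c = '1' then PySem.Int.bxor ((buf.count '1' % 2 : Nat) : Int) 1
          else ((buf.count '1' % 2 : Nat) : Int))
        = (((buf ++ [c]).count '1' % 2 : Nat) : Int) := by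
      by_cases hc : c = '1'
      · rw [if_pos hc, bxor_flip]
        subst hc
        simp [List.count_append]
      · rw [if_neg hc]
        simp [List.count_append, hc]
    rw [show blockEncodeStepB (out, buf, ((buf.count '1' % 2 : Nat) : Int)) c
        = if (buf ++ [c]).length = 8
          then (out ++ PySem.Int.toChars (((buf ++ [c]).count '1' % 2 : Nat) : Int) ++ (buf ++ [c]), [], 0)
          else (out, buf ++ [c], (((buf ++ [c]).count '1' % 2 : Nat) : Int)) from by
      simp only [blockEncodeStepB, hpar]]
    by_cases h8 : (buf ++ [c]).length = 8
    · rw [if_pos h8]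
      have h0 : ((0:Int)) = (((([] : List Char).count '1' % 2 : Nat) : Int)) := by simp
      rw [h0]
      rw [ih (out ++ PySem.Int.toChars ((((buf ++ [c]).count '1' % 2 : Nat) : Int)) ++ (buf ++ [c])) [] (by norm_num)]
      rw [List.nil_append, show buf ++ c :: cs = (buf ++ [c]) ++ cs by simp,
          specEnc_block _ _ h8, chunkEnc]
      simp [List.append_assoc]
    · rw [if_neg h8]
      rw [ih out (buf ++ [c]) (by simp at h8 ⊢; omega)]
      simp [List.append_assoc]

-- ===== VERDICT (by name: the statement is the Claim_ definition above) =====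
theorem block_encode_spec : Claim_equal_block_encode := by
  intro message _
  unfold Spec_block_encode block_encode block_encode_alt
  have hB : blockEncodeCoreB message.toList = specEnc message.toList := by
    have := B_inv message.toList [] [] (by norm_num)
    simpa [blockEncodeCoreB] using this
  rw [A_eq_spec, hB]
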